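-- pv_equiv track=rewrite | github.com/plvie/BLASter | src/blaster/size_reduction_gpu.py | dynamic_batches
-- ===== SOURCE A (Python) =====
-- def dynamic_batches(ranges, N, min_batch=8):
--     """
--     Découpe `ranges` en batches dynamiques:
--     - s'arrête et démarre un nouveau batch dès qu'un triplet a k == N
--     - étend le batch tant que la largeur (k-j) n'excède pas la largeur max actuelle
--       ou que le batch n'a pas atteint min_batch
--     - autorise un batch plus petit que min_batch uniquement si la coupure est due à k == N
--
--     Retourne une liste de listes :
--       [batch_size, current_ranges, max_h, max_w]
--     où max_h = max(j - i) et max_w = max(k - j) sur le batch.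
--     """
--     m = len(ranges)
--     offset = 0
--     batches = []
--
--     while offset < m:
--         # init du batch
--         i0, j0, k0 = ranges[offset]
--         max_w = k0 - j0
--         max_h = j0 - i0
--         batch_size = 1
--         hit_N = False
--
--         # essayer d'étendre le batch
--         while offset + batch_size < m:
--             i1, j1, k1 = ranges[offset + batch_size]
--             w1 = k1 - j1
--             h1 = j1 - i1
--
--             # coupure forcée sur k == N
--             if k1 == N:
--                 hit_N = True
--                 break
--
--             # si ca change, on stoppe
--             if w1 != max_w or h1 != max_h:
--                 break
--             batch_size += 1
--
--         # extraction du batch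
--         current_ranges = ranges[offset:offset + batch_size]
--         batches.append([batch_size, current_ranges, max_h, max_w])
--
--         # avancer
--         offset += batch_size
--
--     return batches
-- ===== SOURCE B (Python) =====
-- def dynamic_batches(ranges, N, min_batch=8):
--     """Single flat pass: grow `current`; cut before any element with k == N or
--     whose (h, w) differs from the batch's first element."""
--     batches = []
--     current = []
--     for r in ranges:
--         i, j, k = r
--         if current:
--             i0, j0, k0 = current[0]
--             if k == N or (j - i, k - j) != (j0 - i0, k0 - j0):
--                 batches.append([len(current), current, j0 - i0, k0 - j0])
--                 current = [r]
--                 continue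
--         current.append(r)
--     if current:
--         i0, j0, k0 = current[0]
--         batches.append([len(current), current, j0 - i0, k0 - j0])
--     return batches
-- ===== Notes on version B (the rewrite author's own statement) =====
-- stated objective: simpler
-- what changed: Replaced the nested index-based while loops (inner scan to find the cut, then a slice) by a single flat pass over the elements that maintains the current batch as a growing list and flushes it at each cut, with no index arithmetic or slicing.
import Mathlib
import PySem

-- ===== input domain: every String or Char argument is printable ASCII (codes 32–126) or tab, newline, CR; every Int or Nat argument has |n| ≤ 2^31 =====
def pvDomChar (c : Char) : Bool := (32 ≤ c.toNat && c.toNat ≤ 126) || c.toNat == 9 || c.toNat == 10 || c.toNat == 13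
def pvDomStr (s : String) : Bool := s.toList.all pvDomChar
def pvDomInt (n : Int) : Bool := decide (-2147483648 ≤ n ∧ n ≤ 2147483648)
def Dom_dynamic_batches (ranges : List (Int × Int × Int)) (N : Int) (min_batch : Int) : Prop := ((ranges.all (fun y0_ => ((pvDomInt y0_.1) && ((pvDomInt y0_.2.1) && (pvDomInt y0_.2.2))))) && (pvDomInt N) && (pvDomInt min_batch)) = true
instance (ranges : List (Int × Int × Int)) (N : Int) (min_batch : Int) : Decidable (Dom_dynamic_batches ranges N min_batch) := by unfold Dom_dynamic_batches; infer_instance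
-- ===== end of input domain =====

-- B replaces A's nested index-based while loops and slicing by one flat pass that grows the
-- current batch as a list and flushes it at each cut (objective: simpler; same O(n) cost).

-- ===== PORT A =====
-- inner while loop of A: extends batch_size while no cut condition fires.
-- `fuel` only makes the recursion structural (it starts at m - (offset + bs), enough
-- for every iteration the Python loop performs; the loop guard is re-checked each step).
def dbA_innerGo (ranges : List (Int × Int × Int)) (N : Int) (m offset : Nat)
    (max_w max_h : Int) : Nat → Nat → Nat
  | 0, bs => bs
  | fuel + 1, bs =>
    if offset + bs < m then
      match ranges[offset + bs]? with
      | some (i1, j1, k1) =>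
        if k1 = N then bs                                   -- coupure forcée sur k == N
        else if k1 - j1 ≠ max_w ∨ j1 - i1 ≠ max_h then bs   -- si ca change, on stoppe
        else dbA_innerGo ranges N m offset max_w max_h fuel (bs + 1)
      | none => bs
    else bs

def dbA_inner (ranges : List (Int × Int × Int)) (N : Int) (m offset : Nat)
    (max_w max_h : Int) (bs : Nat) : Nat :=
  dbA_innerGo ranges N m offset max_w max_h (m - (offset + bs)) bs

-- outer while loop of A over offset (fuel = m - offset, same totality guard)
def dbA_outerGo (ranges : List (Int × Int × Int)) (N : Int) (m : Nat) :
    Nat → Nat → List (Int × (List (Int × Int × Int)) × Int × Int)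
  | 0, _ => []
  | fuel + 1, offset =>
    if offset < m then
      match ranges[offset]? with
      | some (i0, j0, k0) =>
        let max_w := k0 - j0
        let max_h := j0 - i0
        let bs := dbA_inner ranges N m offset max_w max_h 1
        let current := PySem.List.slice ranges (some (offset : Int)) (some ((offset + bs : Nat) : Int))
        ((bs : Int), current, max_h, max_w) :: dbA_outerGo ranges N m fuel (offset + bs)
      | none => []
    else []

def dynamic_batches (ranges : List (Int × Int × Int)) (N : Int) (min_batch : Int) :
    List (Int × (List (Int × Int × Int)) × Int × Int) :=
  dbA_outerGo ranges N ranges.length ranges.length 0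

-- ===== PORT B =====
-- the trailing `if current:` flush of Source B
def dbB_flush (current : List (Int × Int × Int)) :
    List (Int × (List (Int × Int × Int)) × Int × Int) :=
  match current with
  | [] => []
  | (i0, j0, k0) :: rest =>
      [(((rest.length + 1 : Nat) : Int), (i0, j0, k0) :: rest, j0 - i0, k0 - j0)]

-- the flat `for r in ranges` loop of Source B, state = (emitted batches via cons) and `current`
def dbB_go (N : Int) (rs current : List (Int × Int × Int)) :
    List (Int × (List (Int × Int × Int)) × Int × Int) :=
  match rs with
  | [] => dbB_flush current
  | (i, j, k) :: rest =>
    match current with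
    | [] => dbB_go N rest [(i, j, k)]
    | (i0, j0, k0) :: c' =>
      if k = N ∨ (j - i, k - j) ≠ (j0 - i0, k0 - j0) then
        (((c'.length + 1 : Nat) : Int), (i0, j0, k0) :: c', j0 - i0, k0 - j0)
          :: dbB_go N rest [(i, j, k)]
      else
        dbB_go N rest ((i0, j0, k0) :: c' ++ [(i, j, k)])

def dynamic_batches_alt (ranges : List (Int × Int × Int)) (N : Int) (min_batch : Int) :
    List (Int × (List (Int × Int × Int)) × Int × Int) :=
  dbB_go N ranges []

-- ===== PRECONDITION & SPEC =====
def Spec_dynamic_batches (ranges : List (Int × Int × Int)) (N : Int) (min_batch : Int) (out : List (Int × (List (Int × Int × Int)) × Int × Int)) : Prop := out = dynamic_batches_alt ranges N min_batch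
instance (ranges : List (Int × Int × Int)) (N : Int) (min_batch : Int) (out : List (Int × (List (Int × Int × Int)) × Int × Int)) : Decidable (Spec_dynamic_batches ranges N min_batch out) := by unfold Spec_dynamic_batches; infer_instance

-- ===== CLAIM (what is proved, stated in full; the proofs are below) =====
def Claim_equal_dynamic_batches : Prop := ∀ (ranges : List (Int × Int × Int)) (N : Int) (min_batch : Int), Dom_dynamic_batches ranges N min_batch → Spec_dynamic_batches ranges N min_batch (dynamic_batches ranges N min_batch)

-- ===== LEMMAS AND PROOFS =====

-- an element extends a batch whose first element has height mh and width mw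
def dbKeep (N mh mw : Int) (r : Int × Int × Int) : Bool :=
  !(r.2.2 == N) && (r.2.2 - r.2.1 == mw) && (r.2.1 - r.1 == mh)

theorem dbA_innerGo_eq (ranges : List (Int × Int × Int)) (N : Int) (offset : Nat)
    (mw mh : Int) (fuel bs : Nat) (hf : ranges.length - (offset + bs) ≤ fuel) :
    dbA_innerGo ranges N ranges.length offset mw mh fuel bs
      = bs + ((ranges.drop (offset + bs)).takeWhile (dbKeep N mh mw)).length := by
  induction fuel generalizing bs with
  | zero =>
    rw [List.drop_eq_nil_of_le (by omega)]
    simp [dbA_innerGo]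
  | succ fuel ih =>
    by_cases hlt : offset + bs < ranges.length
    · rcases hget : ranges[offset + bs]'hlt with ⟨i1, j1, k1⟩
      have heq : ranges[offset + bs]? = some (i1, j1, k1) := by
        rw [List.getElem?_eq_some_iff]; exact ⟨hlt, hget⟩
      have hd : ranges.drop (offset + bs) = (i1, j1, k1) :: ranges.drop (offset + bs + 1) := by
        rw [List.drop_eq_getElem_cons hlt, hget]
      simp only [dbA_innerGo, if_pos hlt, heq]
      by_cases hN : k1 = N
      · simp [hd, dbKeep, hN]
      · by_cases hne : k1 - j1 ≠ mw ∨ j1 - i1 ≠ mh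
        · have hk : dbKeep N mh mw (i1, j1, k1) = false := by
            rcases hne with h1 | h1 <;> simp [dbKeep, h1]
          simp [hN, hne, hd, hk]
        · push Not at hne
          have hk : dbKeep N mh mw (i1, j1, k1) = true := by
            simp [dbKeep, hN, hne.1, hne.2]
          rw [if_neg hN, if_neg (by push Not; exact hne)]
          rw [ih (bs + 1) (by omega),
            show offset + (bs + 1) = offset + bs + 1 from by omega,
            hd, List.takeWhile_cons_of_pos hk]
          simp; omega
    · rw [List.drop_eq_nil_of_le (by omega)]
      simp [dbA_innerGo, hlt]

theorem dbB_go_eq (N : Int) (rs c' : List (Int × Int × Int)) (i0 j0 k0 : Int) :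
    dbB_go N rs ((i0, j0, k0) :: c')
      = (((c'.length + (rs.takeWhile (dbKeep N (j0 - i0) (k0 - j0))).length + 1 : Nat) : Int),
         ((i0, j0, k0) :: c') ++ rs.takeWhile (dbKeep N (j0 - i0) (k0 - j0)),
         j0 - i0, k0 - j0)
        :: dbB_go N (rs.dropWhile (dbKeep N (j0 - i0) (k0 - j0))) [] := by
  induction rs generalizing c' with
  | nil => simp [dbB_go, dbB_flush]
  | cons r rest ih =>
    obtain ⟨i, j, k⟩ := r
    by_cases hC : k = N ∨ (j - i, k - j) ≠ (j0 - i0, k0 - j0)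
    · have hk : dbKeep N (j0 - i0) (k0 - j0) (i, j, k) = false := by
        rcases hC with h1 | h1
        · simp [dbKeep, h1]
        · simp only [ne_eq, Prod.mk.injEq, not_and] at h1
          by_cases hj : j - i = j0 - i0
          · simp [dbKeep, h1 hj]
          · simp [dbKeep, hj]
      rw [List.takeWhile_cons_of_neg (by simp [hk]), List.dropWhile_cons_of_neg (by simp [hk])]
      simp only [dbB_go]
      rw [if_pos hC]
      simp
    · have hC' := hC
      push Not at hC
      obtain ⟨h1, h2⟩ := hC
      have h2a : j - i = j0 - i0 := congrArg Prod.fst h2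
      have h2b : k - j = k0 - j0 := congrArg Prod.snd h2
      have hk : dbKeep N (j0 - i0) (k0 - j0) (i, j, k) = true := by
        simp [dbKeep, h1, h2a, h2b]
      rw [List.takeWhile_cons_of_pos hk, List.dropWhile_cons_of_pos hk]
      simp only [dbB_go]
      rw [if_neg hC']
      rw [List.cons_append, ih (c' ++ [(i, j, k)])]
      refine List.cons_eq_cons.mpr ⟨?_, rfl⟩
      refine Prod.ext ?_ (Prod.ext (by simp) rfl)
      simp; omega

theorem dbA_outerGo_eq (ranges : List (Int × Int × Int)) (N : Int) (fuel offset : Nat)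
    (hf : ranges.length - offset ≤ fuel) :
    dbA_outerGo ranges N ranges.length fuel offset = dbB_go N (ranges.drop offset) [] := by
  induction fuel generalizing offset with
  | zero =>
    rw [List.drop_eq_nil_of_le (by omega)]
    simp [dbA_outerGo, dbB_go, dbB_flush]
  | succ fuel ih =>
    by_cases h : offset < ranges.length
    · rcases hget : ranges[offset]'h with ⟨i0, j0, k0⟩
      have heq : ranges[offset]? = some (i0, j0, k0) := by
        rw [List.getElem?_eq_some_iff]; exact ⟨h, hget⟩
      have hd : ranges.drop offset = (i0, j0, k0) :: ranges.drop (offset + 1) := by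
        rw [List.drop_eq_getElem_cons h, hget]
      simp only [dbA_outerGo, if_pos h, heq]
      set P := dbKeep N (j0 - i0) (k0 - j0) with hP
      set tw := (ranges.drop (offset + 1)).takeWhile P with htw
      have hbs : dbA_inner ranges N ranges.length offset (k0 - j0) (j0 - i0) 1
          = 1 + tw.length := by
        unfold dbA_inner
        exact dbA_innerGo_eq ranges N offset (k0 - j0) (j0 - i0) _ 1 (by omega)
      rw [hbs]
      have hpre : tw = (ranges.drop (offset + 1)).take tw.length := by
        rw [htw]
        exact List.prefix_iff_eq_take.mp (List.takeWhile_prefix P)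
      have hslice : PySem.List.slice ranges (some (offset : Int))
          (some ((offset + (1 + tw.length) : Nat) : Int))
          = (i0, j0, k0) :: tw := by
        rw [PySem.List.slice_natCast, hd,
          show offset + (1 + tw.length) - offset = tw.length + 1 from by omega,
          List.take_succ_cons, ← hpre]
      have hdrop2 : ranges.drop (offset + (1 + tw.length))
          = (ranges.drop (offset + 1)).dropWhile P := by
        have hsplit : ranges.drop (offset + 1) = tw ++ (ranges.drop (offset + 1)).dropWhile P := by
          rw [htw, List.takeWhile_append_dropWhile]
        calc ranges.drop (offset + (1 + tw.length))
            = (ranges.drop (offset + 1)).drop tw.length := by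
              rw [List.drop_drop]; congr 1; omega
          _ = (ranges.drop (offset + 1)).dropWhile P := by
              conv_lhs => rw [hsplit]
              simp
      rw [hslice, ih (offset + (1 + tw.length)) (by omega), hdrop2, hd]
      show _ = dbB_go N ((i0, j0, k0) :: ranges.drop (offset + 1)) []
      rw [show dbB_go N ((i0, j0, k0) :: ranges.drop (offset + 1)) []
          = dbB_go N (ranges.drop (offset + 1)) [(i0, j0, k0)] from rfl]
      rw [dbB_go_eq]
      rw [← htw, ← hP]
      refine List.cons_eq_cons.mpr ⟨?_, rfl⟩
      refine Prod.ext ?_ (Prod.ext (by simp) rfl)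
      simp; omega
    · rw [List.drop_eq_nil_of_le (by omega)]
      simp [dbA_outerGo, h, dbB_go, dbB_flush]

-- ===== VERDICT (by name: the statement is the Claim_ definition above) =====
theorem dynamic_batches_spec : Claim_equal_dynamic_batches := by
  intro ranges N min_batch _
  unfold Spec_dynamic_batches dynamic_batches dynamic_batches_alt
  simpa using dbA_outerGo_eq ranges N ranges.length 0 (by omega)
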